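-- pv_equiv track=rewrite | github.com/981377660LMT/algorithm-study | 6_tree/树状数组/315. 计算右侧小于当前元素的个数.py | rangeInv
-- ===== SOURCE A (Python) =====
-- from typing import List, Sequence
-- from typing import List, Sequence, Union
--
-- def rangeInv(nums: List[int]) -> List[List[int]]:
--     n = len(nums)
--     dp = [[0] * (n + 1) for _ in range(n + 1)]
--     for left in range(n, -1, -1):
--         for right in range(left + 2, n + 1):
--             dp[left][right] = dp[left][right - 1] + dp[left + 1][right] - dp[left + 1][right - 1]
--             if nums[left] > nums[right - 1]:
--                 dp[left][right] += 1
--     return dp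
-- ===== SOURCE B (Python) =====
-- from typing import List
--
--
-- def rangeInv(nums: List[int]) -> List[List[int]]:
--     n = len(nums)
--     dp = [[0] * (n + 1) for _ in range(n + 1)]
--     for left in range(n - 1, -1, -1):
--         cnt = 0
--         for right in range(left + 1, n + 1):
--             dp[left][right] = dp[left + 1][right] + cnt
--             if right < n and nums[right] < nums[left]:
--                 cnt += 1
--     return dp
-- ===== Notes on version B (the rewrite author's own statement) =====
-- stated objective: alternative
-- what changed: Replaces the four-term inclusion-exclusion recurrence dp[l][r]=dp[l][r-1]+dp[l+1][r]-dp[l+1][r-1](+1) by inheriting the row below plus a running counter of already-seen elements smaller than nums[l], so each cell needs one addition and one table read instead of three reads and a subtraction.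
import Mathlib
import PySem

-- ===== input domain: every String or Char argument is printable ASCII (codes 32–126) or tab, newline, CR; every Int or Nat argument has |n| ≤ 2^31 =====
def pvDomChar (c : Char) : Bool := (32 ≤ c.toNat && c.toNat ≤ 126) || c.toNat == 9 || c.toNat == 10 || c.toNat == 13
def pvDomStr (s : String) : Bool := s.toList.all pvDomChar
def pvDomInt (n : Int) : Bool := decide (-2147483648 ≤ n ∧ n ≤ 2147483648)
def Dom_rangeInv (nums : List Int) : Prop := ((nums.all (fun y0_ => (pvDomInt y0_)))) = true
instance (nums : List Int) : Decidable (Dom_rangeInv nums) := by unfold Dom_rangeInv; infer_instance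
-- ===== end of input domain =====

-- B replaces A's four-term inclusion-exclusion recurrence by inheriting the row below plus a
-- running counter of smaller elements (alternative decomposition, same O(n^2) cost).

-- ===== PORT A =====
-- Inner-loop body of A: dp[left][right] = dp[left][right-1] + dp[left+1][right] - dp[left+1][right-1] (+1 if nums[left] > nums[right-1]).
-- All list indices A uses are in range (left ≤ n-2 < n, left+1 ≤ n, left+1 ≤ right-1 < right ≤ n), so
-- `getD` here is exactly Python's in-range indexing.
def stepA (nums : List Int) (left : Nat) (dp : List (List Int)) (right : Nat) : List (List Int) :=
  dp.set left ((dp.getD left []).set right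
    (if nums.getD left 0 > nums.getD (right - 1) 0 then
      (dp.getD left []).getD (right - 1) 0
        + (dp.getD (left + 1) []).getD right 0
        - (dp.getD (left + 1) []).getD (right - 1) 0 + 1
     else
      (dp.getD left []).getD (right - 1) 0
        + (dp.getD (left + 1) []).getD right 0
        - (dp.getD (left + 1) []).getD (right - 1) 0))

-- range(n, -1, -1) = [n, n-1, …, 0]; range(left+2, n+1) = List.range' (left+2) (n+1-(left+2)).
def rangeInv (nums : List Int) : List (List Int) :=
  ((List.range (nums.length + 1)).reverse).foldl
    (fun dp left =>
      (List.range' (left + 2) (nums.length + 1 - (left + 2))).foldl (stepA nums left) dp)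
    (List.replicate (nums.length + 1) (List.replicate (nums.length + 1) (0 : Int)))

-- ===== PORT B =====
-- Inner-loop body of B: dp[left][right] = dp[left+1][right] + cnt, then bump cnt when right < n and
-- nums[right] < nums[left].  Indices in range as in A, so `getD` is Python's indexing.
def stepB (nums : List Int) (n left : Nat) (st : List (List Int) × Int) (right : Nat) :
    List (List Int) × Int :=
  (st.1.set left ((st.1.getD left []).set right ((st.1.getD (left + 1) []).getD right 0 + st.2)),
   if right < n ∧ nums.getD right 0 < nums.getD left 0 then st.2 + 1 else st.2)

-- range(n-1, -1, -1) = [n-1, …, 0]; range(left+1, n+1) = List.range' (left+1) (n-left).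
def rangeInv_alt (nums : List Int) : List (List Int) :=
  ((List.range nums.length).reverse).foldl
    (fun dp left =>
      ((List.range' (left + 1) (nums.length - left)).foldl
        (stepB nums nums.length left) (dp, (0 : Int))).1)
    (List.replicate (nums.length + 1) (List.replicate (nums.length + 1) (0 : Int)))

-- ===== PRECONDITION & SPEC =====
def Spec_rangeInv (nums : List Int) (out : List (List Int)) : Prop := out = rangeInv_alt nums
instance (nums : List Int) (out : List (List Int)) : Decidable (Spec_rangeInv nums out) := by unfold Spec_rangeInv; infer_instance

-- ===== CLAIM (what is proved, stated in full; the proofs are below) =====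
def Claim_equal_rangeInv : Prop := ∀ (nums : List Int), Dom_rangeInv nums → Spec_rangeInv nums (rangeInv nums)

-- ===== LEMMAS AND PROOFS =====

-- Number of k ∈ (l, r) with nums[k] < nums[l] (pairs whose left index is l, inside nums[l:r]).
def sCnt (nums : List Int) (l r : Nat) : Int :=
  (((List.range' (l + 1) (r - (l + 1))).countP
      (fun k => decide (nums.getD k 0 < nums.getD l 0)) : Nat) : Int)

-- Inversion count of the slice nums[l:r].
def invc (nums : List Int) (l r : Nat) : Int :=
  (((List.range' l (r - l)).map (fun i => sCnt nums i r)).sum)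

-- The common reference table: (n+1)×(n+1), entry (l, r) = invc l r.
def tabF (n : Nat) (g : Nat → Nat → Int) : List (List Int) :=
  (List.range (n + 1)).map (fun l => (List.range (n + 1)).map (g l))

lemma sCnt_degenerate (nums : List Int) (l r : Nat) (h : r ≤ l + 1) : sCnt nums l r = 0 := by
  simp [sCnt, Nat.sub_eq_zero_of_le h]

lemma invc_degenerate (nums : List Int) (l r : Nat) (h : r ≤ l + 1) : invc nums l r = 0 := by
  rcases Nat.lt_or_ge l r with h' | h'
  · have : r - l = 1 := by omega
    simp [invc, this, sCnt_degenerate nums l r h]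
  · simp [invc, Nat.sub_eq_zero_of_le h']

lemma invc_cons (nums : List Int) (l r : Nat) (h : l < r) :
    invc nums l r = sCnt nums l r + invc nums (l + 1) r := by
  have h1 : r - l = (r - (l + 1)) + 1 := by omega
  simp [invc, h1, List.range'_succ]

lemma sCnt_snoc (nums : List Int) (l r : Nat) (h : l ≤ r) :
    sCnt nums l (r + 1) =
      sCnt nums l r + (if nums.getD r 0 < nums.getD l 0 then 1 else 0) := by
  rcases Nat.lt_or_ge l r with h' | h'
  · have h1 : r + 1 - (l + 1) = (r - (l + 1)) + 1 := by omega
    have h2 : l + 1 + (r - (l + 1)) = r := by omega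
    rw [sCnt, h1, List.range'_1_concat, h2, List.countP_append]
    rw [sCnt]
    push_cast
    split <;> simp_all
  · have hlr : l = r := by omega
    subst hlr
    simp [sCnt_degenerate nums l (l + 1) (by omega), sCnt_degenerate nums l l (by omega)]

lemma invc_recA (nums : List Int) (l r : Nat) (h : l + 2 ≤ r) :
    invc nums l r = invc nums l (r - 1) + invc nums (l + 1) r - invc nums (l + 1) (r - 1)
      + (if nums.getD l 0 > nums.getD (r - 1) 0 then 1 else 0) := by
  have e1 := invc_cons nums l r (by omega)
  have e2 := invc_cons nums l (r - 1) (by omega)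
  have e3 : sCnt nums l r = sCnt nums l (r - 1) + (if nums.getD (r - 1) 0 < nums.getD l 0 then 1 else 0) := by
    have := sCnt_snoc nums l (r - 1) (by omega)
    rwa [Nat.sub_add_cancel (by omega)] at this
  have e4 : (if nums.getD l 0 > nums.getD (r - 1) 0 then (1:Int) else 0)
      = (if nums.getD (r - 1) 0 < nums.getD l 0 then 1 else 0) := by rfl
  rw [e4]; omega

-- Reading / writing the reference-shaped table.
lemma tabF_getD (n : Nat) (g : Nat → Nat → Int) (l : Nat) (h : l ≤ n) :
    (tabF n g).getD l [] = (List.range (n + 1)).map (g l) := by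
  rw [tabF, List.getD_eq_getElem?_getD]
  simp [Nat.lt_succ_of_le h]

lemma map_range_getD (k r : Nat) (f : Nat → Int) (h : r < k) :
    ((List.range k).map f).getD r 0 = f r := by
  rw [List.getD_eq_getElem?_getD]; simp [h]

lemma map_range_set (k i : Nat) (f : Nat → Int) (x : Int) :
    ((List.range k).map f).set i x = (List.range k).map (fun j => if j = i then x else f j) := by
  apply List.ext_getElem
  · simp
  · intro j hj hj'
    simp only [List.length_map, List.length_range] at hj
    rw [List.getElem_set]
    by_cases h : i = j
    · simp [h]
    · have h2 : ¬ (j = i) := fun hji => h hji.symm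
      simp [h, h2]

lemma map_range_set_outer (k i : Nat) (f : Nat → List Int) (x : List Int) :
    ((List.range k).map f).set i x = (List.range k).map (fun j => if j = i then x else f j) := by
  apply List.ext_getElem
  · simp
  · intro j hj hj'
    simp only [List.length_map, List.length_range] at hj
    rw [List.getElem_set]
    by_cases h : i = j
    · simp [h]
    · have h2 : ¬ (j = i) := fun hji => h hji.symm
      simp [h, h2]

lemma tabF_update (n : Nat) (g : Nat → Nat → Int) (i j : Nat) (x : Int) :
    (tabF n g).set i (((List.range (n + 1)).map (g i)).set j x)
      = (List.range (n + 1)).map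
          (fun l => (List.range (n + 1)).map (fun r => if l = i ∧ r = j then x else g l r)) := by
  rw [map_range_set, tabF, map_range_set_outer]
  apply List.map_congr_left
  intro l _
  by_cases h : l = i
  · subst h
    simp only [if_pos rfl]
    apply List.map_congr_left
    intro c _
    by_cases hc : c = j <;> simp [hc]
  · simp only [if_neg h]
    apply List.map_congr_left
    intro c _
    simp [h]

lemma tabF_congr (n : Nat) (g g' : Nat → Nat → Int)
    (h : ∀ l r, l ≤ n → r ≤ n → g l r = g' l r) : tabF n g = tabF n g' := by
  unfold tabF
  apply List.map_congr_left
  intro l hl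
  apply List.map_congr_left
  intro r hr
  exact h l r (by simpa [Nat.lt_succ_iff] using hl) (by simpa [Nat.lt_succ_iff] using hr)

-- The initial all-zero table in tabF form.
lemma init_eq_tabF (n : Nat) :
    List.replicate (n + 1) (List.replicate (n + 1) (0 : Int)) = tabF n (fun _ _ => 0) := by
  unfold tabF
  have : (List.range (n + 1)).map (fun _ => (List.range (n + 1)).map (fun _ => (0:Int)))
      = List.replicate (n + 1) ((List.range (n + 1)).map (fun _ => (0:Int))) := by simp
  simp

-- Row-m-in-progress table for outer index m, columns [m+2, R) of row m filled; rows > m done.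
def gA (nums : List Int) (m R : Nat) : Nat → Nat → Int :=
  fun l r => if m + 1 ≤ l then invc nums l r else if l = m ∧ m + 2 ≤ r ∧ r < R then invc nums l r else 0

lemma stepA_tabF (nums : List Int) (n m r : Nat) (hm : m + 2 ≤ r) (hr : r ≤ n)
    (hn : n ≤ nums.length) :
    stepA nums m (tabF n (gA nums m r)) r = tabF n (gA nums m (r + 1)) := by
  have hmn : m + 1 ≤ n := by omega
  have hm2 : m ≤ n := by omega
  unfold stepA
  rw [tabF_getD n _ m hm2, tabF_getD n _ (m + 1) hmn]
  rw [map_range_getD _ _ _ (by omega), map_range_getD _ _ _ (by omega),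
      map_range_getD _ _ _ (by omega)]
  have v1 : gA nums m r m (r - 1) = invc nums m (r - 1) := by
    unfold gA
    rcases Nat.lt_or_ge (r - 1) (m + 2) with h' | h'
    · have : r - 1 = m + 1 := by omega
      simp [this, invc_degenerate nums m (m + 1) (by omega)]
    · simp [hm2]; omega
  have v2 : gA nums m r (m + 1) r = invc nums (m + 1) r := by simp [gA]
  have v3 : gA nums m r (m + 1) (r - 1) = invc nums (m + 1) (r - 1) := by simp [gA]
  rw [v1, v2, v3, tabF_update]
  rw [show (List.range (n + 1)).map
        (fun l => (List.range (n + 1)).map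
          (fun c => if l = m ∧ c = r then
              (if nums.getD m 0 > nums.getD (r - 1) 0 then
                invc nums m (r - 1) + invc nums (m + 1) r - invc nums (m + 1) (r - 1) + 1
               else invc nums m (r - 1) + invc nums (m + 1) r - invc nums (m + 1) (r - 1))
            else gA nums m r l c))
      = tabF n (fun l c => if l = m ∧ c = r then
              (if nums.getD m 0 > nums.getD (r - 1) 0 then
                invc nums m (r - 1) + invc nums (m + 1) r - invc nums (m + 1) (r - 1) + 1
               else invc nums m (r - 1) + invc nums (m + 1) r - invc nums (m + 1) (r - 1))
            else gA nums m r l c) from rfl]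
  apply tabF_congr
  intro l c hl hc
  by_cases hlc : l = m ∧ c = r
  · rw [if_pos hlc]
    obtain ⟨hlm, hcr⟩ := hlc
    subst hlm; subst hcr
    have : gA nums l (c + 1) l c = invc nums l c := by simp [gA]; omega
    rw [this, invc_recA nums l c hm]
    split <;> ring
  · simp only [if_neg hlc]
    unfold gA
    by_cases h1 : m + 1 ≤ l
    · simp [h1]
    · by_cases h2 : l = m ∧ m + 2 ≤ c ∧ c < r
      · have h3 : l = m ∧ m + 2 ≤ c ∧ c < r + 1 := ⟨h2.1, h2.2.1, by omega⟩
        simp [h2, h3]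
      · have h3 : ¬ (l = m ∧ m + 2 ≤ c ∧ c < r + 1) := by
          intro h3
          obtain ⟨e1, e2, e3⟩ := h3
          have e4 : ¬ c < r := fun hc' => h2 ⟨e1, e2, hc'⟩
          exact hlc ⟨e1, by omega⟩
        simp only [if_neg h1, if_neg h2, if_neg h3]

lemma innerA_fold (nums : List Int) (n m : Nat) (hn : n ≤ nums.length) :
    ∀ j, m + 2 + j ≤ n + 1 →
      (List.range' (m + 2) j).foldl (stepA nums m) (tabF n (gA nums m (m + 2)))
        = tabF n (gA nums m (m + 2 + j)) := by
  intro j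
  induction j with
  | zero => intro _; simp
  | succ j ih =>
    intro hj
    rw [List.range'_1_concat, List.foldl_append]
    rw [ih (by omega)]
    simp only [List.foldl_cons, List.foldl_nil]
    exact stepA_tabF nums n m (m + 2 + j) (by omega) (by omega) hn

-- the outer-fold invariant table: rows ≥ L filled, rows < L zero
def gOut (nums : List Int) (L : Nat) : Nat → Nat → Int :=
  fun l r => if L ≤ l then invc nums l r else 0

lemma gA_start (nums : List Int) (n m : Nat) (hm : m ≤ n) :
    tabF n (gOut nums (m + 1)) = tabF n (gA nums m (m + 2)) := by
  apply tabF_congr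
  intro l r _ _
  unfold gOut gA
  by_cases h : m + 1 ≤ l
  · simp [h]
  · simp [h]

lemma gA_finish (nums : List Int) (n m : Nat) (hm : m ≤ n) :
    tabF n (gA nums m (n + 1)) = tabF n (gOut nums m) := by
  apply tabF_congr
  intro l r hl hr
  unfold gA gOut
  by_cases h : m + 1 ≤ l
  · simp [h]; omega
  · have hlm : l ≤ m := by omega
    by_cases h2 : l = m
    · subst h2
      simp only [if_neg h]
      by_cases h3 : l + 2 ≤ r ∧ r < n + 1
      · simp [h3]
      · have : r ≤ l + 1 := by omega
        simp [invc_degenerate nums l r this]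
    · simp [h, h2]; omega

lemma outerA_step (nums : List Int) (n m : Nat) (hm : m ≤ n) (hn : n ≤ nums.length) :
    (List.range' (m + 2) (n + 1 - (m + 2))).foldl (stepA nums m) (tabF n (gOut nums (m + 1)))
      = tabF n (gOut nums m) := by
  rw [gA_start nums n m hm]
  by_cases h : m + 2 ≤ n + 1
  · rw [innerA_fold nums n m hn (n + 1 - (m + 2)) (by omega)]
    have : m + 2 + (n + 1 - (m + 2)) = n + 1 := by omega
    rw [this, gA_finish nums n m hm]
  · have h0 : n + 1 - (m + 2) = 0 := by omega
    rw [h0]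
    simp only [List.range'_zero, List.foldl_nil]
    apply tabF_congr
    intro l r hl hr
    unfold gA gOut
    by_cases h1 : m + 1 ≤ l
    · simp [h1, show m ≤ l by omega]
    · have h2 : ¬ (l = m ∧ m + 2 ≤ r ∧ r < m + 2) := by omega
      rw [if_neg h1, if_neg h2]
      by_cases h3 : m ≤ l
      · have hlm : l = m := by omega
        rw [if_pos h3, invc_degenerate nums l r (by omega)]
      · rw [if_neg h3]

lemma outerA_fold (nums : List Int) (n : Nat) (hn : n = nums.length) :
    ∀ L, L ≤ n + 1 →
      ((List.range L).reverse).foldl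
        (fun dp left => (List.range' (left + 2) (n + 1 - (left + 2))).foldl (stepA nums left) dp)
        (tabF n (gOut nums L))
      = tabF n (gOut nums 0) := by
  intro L
  induction L with
  | zero => intro _; simp
  | succ L ih =>
    intro hL
    rw [List.range_succ, List.reverse_append]
    simp only [List.reverse_cons, List.reverse_nil, List.nil_append, List.singleton_append,
      List.foldl_cons]
    rw [outerA_step nums n L (by omega) (by omega)]
    exact ih (by omega)

lemma rangeInv_eq_ref (nums : List Int) :
    rangeInv nums = tabF nums.length (gOut nums 0) := by
  unfold rangeInv
  rw [init_eq_tabF]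
  have h0 : tabF nums.length (fun _ _ => 0) = tabF nums.length (gOut nums (nums.length + 1)) := by
    apply tabF_congr
    intro l r hl _
    unfold gOut
    simp [show ¬ (nums.length + 1 ≤ l) by omega]
  rw [h0]
  exact outerA_fold nums nums.length rfl (nums.length + 1) (by omega)

-- ===== B side =====
def gB (nums : List Int) (m R : Nat) : Nat → Nat → Int :=
  fun l r => if m + 1 ≤ l then invc nums l r else if l = m ∧ m + 1 ≤ r ∧ r < R then invc nums l r else 0

lemma stepB_tabF (nums : List Int) (n m r : Nat) (hm : m + 1 ≤ r) (hr : r ≤ n)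
    (hn : n = nums.length) :
    stepB nums n m (tabF n (gB nums m r), sCnt nums m (min r n)) r
      = (tabF n (gB nums m (r + 1)), sCnt nums m (min (r + 1) n)) := by
  have hmn : m + 1 ≤ n := by omega
  have hm2 : m ≤ n := by omega
  unfold stepB
  simp only [Prod.mk.injEq]
  rw [tabF_getD n _ m hm2, tabF_getD n _ (m + 1) hmn]
  rw [map_range_getD _ _ _ (by omega)]
  have v2 : gB nums m r (m + 1) r = invc nums (m + 1) r := by simp [gB]
  rw [v2]
  have hminr : min r n = r := by omega
  rw [hminr]
  refine ⟨?_, ?_⟩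
  · rw [tabF_update]
    rw [show (List.range (n + 1)).map
          (fun l => (List.range (n + 1)).map
            (fun c => if l = m ∧ c = r then invc nums (m + 1) r + sCnt nums m r
              else gB nums m r l c))
        = tabF n (fun l c => if l = m ∧ c = r then invc nums (m + 1) r + sCnt nums m r
              else gB nums m r l c) from rfl]
    apply tabF_congr
    intro l c hl hc
    by_cases hlc : l = m ∧ c = r
    · rw [if_pos hlc]
      obtain ⟨hlm, hcr⟩ := hlc
      subst hlm; subst hcr
      have : gB nums l (c + 1) l c = invc nums l c := by simp [gB]; omega
      rw [this, invc_cons nums l c (by omega)]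
      ring
    · simp only [if_neg hlc]
      unfold gB
      by_cases h1 : m + 1 ≤ l
      · simp [h1]
      · by_cases h2 : l = m ∧ m + 1 ≤ c ∧ c < r
        · have h3 : l = m ∧ m + 1 ≤ c ∧ c < r + 1 := ⟨h2.1, h2.2.1, by omega⟩
          simp [h2, h3]
        · have h3 : ¬ (l = m ∧ m + 1 ≤ c ∧ c < r + 1) := by
            intro h3
            obtain ⟨e1, e2, e3⟩ := h3
            have e4 : ¬ c < r := fun hc' => h2 ⟨e1, e2, hc'⟩
            exact hlc ⟨e1, by omega⟩
          simp only [if_neg h1, if_neg h2, if_neg h3]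
  · by_cases h : r < n ∧ nums.getD r 0 < nums.getD m 0
    · have hmin : min (r + 1) n = r + 1 := by omega
      rw [hmin, if_pos h, sCnt_snoc nums m r (by omega), if_pos h.2]
    · rw [if_neg h]
      rcases Nat.lt_or_ge r n with h1 | h1
      · have h2 : ¬ nums.getD r 0 < nums.getD m 0 := by tauto
        have hmin : min (r + 1) n = r + 1 := by omega
        rw [hmin, sCnt_snoc nums m r (by omega), if_neg h2]
        ring
      · have hrn : r = n := by omega
        subst hrn
        have : min (r + 1) r = r := by omega
        rw [this]

lemma innerB_fold (nums : List Int) (n m : Nat) (hn : n = nums.length) :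
    ∀ j, m + 1 + j ≤ n + 1 →
      (List.range' (m + 1) j).foldl (stepB nums n m)
          (tabF n (gB nums m (m + 1)), sCnt nums m (min (m + 1) n))
        = (tabF n (gB nums m (m + 1 + j)), sCnt nums m (min (m + 1 + j) n)) := by
  intro j
  induction j with
  | zero => intro _; simp
  | succ j ih =>
    intro hj
    rw [List.range'_1_concat, List.foldl_append]
    rw [ih (by omega)]
    simp only [List.foldl_cons, List.foldl_nil]
    exact stepB_tabF nums n m (m + 1 + j) (by omega) (by omega) hn

lemma gB_start (nums : List Int) (n m : Nat) (hm : m ≤ n) :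
    tabF n (gOut nums (m + 1)) = tabF n (gB nums m (m + 1)) := by
  apply tabF_congr
  intro l r _ _
  unfold gOut gB
  by_cases h : m + 1 ≤ l
  · simp [h]
  · simp [h]

lemma gB_finish (nums : List Int) (n m : Nat) (hm : m ≤ n) :
    tabF n (gB nums m (n + 1)) = tabF n (gOut nums m) := by
  apply tabF_congr
  intro l r hl hr
  unfold gB gOut
  by_cases h : m + 1 ≤ l
  · simp [h]; omega
  · by_cases h2 : l = m
    · subst h2
      simp only [if_neg h]
      by_cases h3 : l + 1 ≤ r ∧ r < n + 1
      · simp [h3]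
      · have : r ≤ l := by omega
        simp [invc_degenerate nums l r (by omega)]
    · simp [h, h2]; omega

lemma outerB_step (nums : List Int) (n m : Nat) (hm : m < n) (hn : n = nums.length) :
    ((List.range' (m + 1) (n - m)).foldl (stepB nums n m) (tabF n (gOut nums (m + 1)), (0 : Int))).1
      = tabF n (gOut nums m) := by
  have h0 : (0 : Int) = sCnt nums m (min (m + 1) n) := by
    have : min (m + 1) n = m + 1 := by omega
    rw [this, sCnt_degenerate nums m (m + 1) (by omega)]
  rw [gB_start nums n m (by omega), h0]
  rw [show n - m = n + 1 - (m + 1) by omega] at *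
  rw [innerB_fold nums n m hn (n + 1 - (m + 1)) (by omega)]
  simp only
  have : m + 1 + (n + 1 - (m + 1)) = n + 1 := by omega
  rw [this, gB_finish nums n m (by omega)]

lemma outerB_fold (nums : List Int) (n : Nat) (hn : n = nums.length) :
    ∀ L, L ≤ n →
      ((List.range L).reverse).foldl
        (fun dp left =>
          ((List.range' (left + 1) (n - left)).foldl (stepB nums n left) (dp, (0 : Int))).1)
        (tabF n (gOut nums L))
      = tabF n (gOut nums 0) := by
  intro L
  induction L with
  | zero => intro _; simp
  | succ L ih =>
    intro hL
    rw [List.range_succ, List.reverse_append]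
    simp only [List.reverse_cons, List.reverse_nil, List.nil_append, List.singleton_append,
      List.foldl_cons]
    rw [outerB_step nums n L (by omega) hn]
    exact ih (by omega)

lemma rangeInv_alt_eq_ref (nums : List Int) :
    rangeInv_alt nums = tabF nums.length (gOut nums 0) := by
  unfold rangeInv_alt
  rw [init_eq_tabF]
  have h0 : tabF nums.length (fun _ _ => 0) = tabF nums.length (gOut nums nums.length) := by
    apply tabF_congr
    intro l r hl hr
    unfold gOut
    by_cases h : nums.length ≤ l
    · rw [if_pos h, invc_degenerate nums l r (by omega)]
    · simp [h]
  rw [h0]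
  exact outerB_fold nums nums.length rfl nums.length (le_refl _)

-- ===== VERDICT (by name: the statement is the Claim_ definition above) =====
theorem rangeInv_spec : Claim_equal_rangeInv := by
  intro nums _
  unfold Spec_rangeInv
  rw [rangeInv_eq_ref, rangeInv_alt_eq_ref]
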